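-- pv_equiv track=rewrite | github.com/mejukoo-svg/newTightauto | 국내_세트별.py | get_rate_for_date
-- ===== SOURCE A (Python) =====
-- FALLBACK_USD_KRW = 1450
--
-- def get_rate_for_date(rates, dk, fallback=FALLBACK_USD_KRW):
--     if dk in rates: return rates[dk]
--     if rates:
--         sorted_keys = sorted(rates.keys())
--         prev = [k for k in sorted_keys if k <= dk]
--         if prev: return rates[prev[-1]]
--         return rates[sorted_keys[0]]
--     return fallback
-- ===== SOURCE B (Python) =====
-- FALLBACK_USD_KRW = 1450
--
-- def get_rate_for_date(rates, dk, fallback=FALLBACK_USD_KRW):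
--     # one linear pass: track the largest key <= dk and the smallest key overall
--     best = None
--     mn = None
--     for k in rates:
--         if k <= dk and (best is None or best < k):
--             best = k
--         if mn is None or k < mn:
--             mn = k
--     if best is not None:
--         return rates[best]
--     if mn is not None:
--         return rates[mn]
--     return fallback
-- ===== Notes on version B (the rewrite author's own statement) =====
-- stated objective: faster
-- what changed: A sorts all keys and builds a filtered prefix list to pick the nearest earlier date; B makes a single linear pass over the dict keys tracking the largest key <= dk and the smallest key overall.
import Mathlib
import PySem

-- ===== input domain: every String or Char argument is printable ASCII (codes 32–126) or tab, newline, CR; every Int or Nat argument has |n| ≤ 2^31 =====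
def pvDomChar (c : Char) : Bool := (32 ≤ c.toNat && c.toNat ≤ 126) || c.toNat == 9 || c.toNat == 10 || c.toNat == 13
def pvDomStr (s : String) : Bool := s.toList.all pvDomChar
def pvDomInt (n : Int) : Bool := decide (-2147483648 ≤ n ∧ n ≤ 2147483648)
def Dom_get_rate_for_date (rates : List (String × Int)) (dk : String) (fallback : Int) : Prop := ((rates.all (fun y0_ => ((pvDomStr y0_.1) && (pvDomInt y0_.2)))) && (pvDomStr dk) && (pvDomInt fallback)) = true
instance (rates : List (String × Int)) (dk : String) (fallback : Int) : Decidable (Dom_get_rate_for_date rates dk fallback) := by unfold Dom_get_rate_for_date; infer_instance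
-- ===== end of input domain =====

-- B replaces A's sort-then-filter by one linear pass tracking the largest key ≤ dk
-- and the smallest key overall; return values are proved equal.

-- ===== PORT A =====
-- A, step for step: membership test, sorted keys, filter ≤ dk, its last element, else first sorted key.
def get_rate_for_date (rates : List (String × Int)) (dk : String) (fallback : Int) : Int :=
  let d := PySem.Dict.ofList rates
  if d.contains dk then d.getD dk 0
  else if d.items ≠ [] then
    let sorted_keys := PySem.List.sorted d.keys (fun k => k) false
    let prev := sorted_keys.filter (fun k => decide (k ≤ dk))
    match PySem.List.pyGet? prev (-1) with
    | some k => d.getD k 0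
    | none =>
      match PySem.List.pyGet? sorted_keys 0 with
      | some k => d.getD k 0
      | none => fallback   -- unreachable: rates is nonempty here
  else fallback

-- ===== PORT B =====
-- step of B's single loop on key k: update (best key ≤ dk, min key), short-circuit as in Source B
def pvStep (dk : String) (st : Option String × Option String) (k : String) :
    Option String × Option String :=
  let best :=
    match st.1 with
    | none => if k ≤ dk then some k else none
    | some b => if k ≤ dk ∧ b < k then some k else some b
  let mn :=
    match st.2 with
    | none => some k
    | some m => if k < m then some k else some m
  (best, mn)

def get_rate_for_date_alt (rates : List (String × Int)) (dk : String) (fallback : Int) : Int :=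
  let d := PySem.Dict.ofList rates
  let st := d.keys.foldl (pvStep dk) (none, none)
  match st.1 with
  | some b => d.getD b 0
  | none =>
    match st.2 with
    | some m => d.getD m 0
    | none => fallback

-- ===== PRECONDITION & SPEC =====
def Spec_get_rate_for_date (rates : List (String × Int)) (dk : String) (fallback : Int) (out : Int) : Prop := out = get_rate_for_date_alt rates dk fallback
instance (rates : List (String × Int)) (dk : String) (fallback : Int) (out : Int) : Decidable (Spec_get_rate_for_date rates dk fallback out) := by unfold Spec_get_rate_for_date; infer_instance

-- ===== CLAIM (what is proved, stated in full; the proofs are below) =====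
def Claim_equal_get_rate_for_date : Prop := ∀ (rates : List (String × Int)) (dk : String) (fallback : Int), Dom_get_rate_for_date rates dk fallback → Spec_get_rate_for_date rates dk fallback (get_rate_for_date rates dk fallback)

-- ===== LEMMAS AND PROOFS =====

-- "o is the greatest key ≤ dk of l (none if there is none)"
def MaxLE (dk : String) (l : List String) (o : Option String) : Prop :=
  match o with
  | none => ∀ y ∈ l, ¬ y ≤ dk
  | some b => b ∈ l ∧ b ≤ dk ∧ ∀ y ∈ l, y ≤ dk → y ≤ b

-- "o is the least key of l (none iff l = [])"
def MinOf (l : List String) (o : Option String) : Prop :=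
  match o with
  | none => l = []
  | some m => m ∈ l ∧ ∀ y ∈ l, m ≤ y

theorem maxLE_unique (dk : String) (l : List String) (o o' : Option String)
    (h : MaxLE dk l o) (h' : MaxLE dk l o') : o = o' := by
  match o, o' with
  | none, none => rfl
  | none, some b => exact absurd h'.2.1 (h b h'.1)
  | some b, none => exact absurd h.2.1 (h' b h.1)
  | some b, some b' =>
    exact congrArg some (le_antisymm (h'.2.2 b h.1 h.2.1) (h.2.2 b' h'.1 h'.2.1))

theorem minOf_unique (l : List String) (o o' : Option String)
    (h : MinOf l o) (h' : MinOf l o') : o = o' := by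
  match o, o' with
  | none, none => rfl
  | none, some m => exact absurd (h ▸ h'.1) (List.not_mem_nil)
  | some m, none => exact absurd (h' ▸ h.1) (List.not_mem_nil)
  | some m, some m' =>
    exact congrArg some (le_antisymm (h.2 m' h'.1) (h'.2 m h.1))

theorem maxLE_step (dk k : String) (l : List String) (st : Option String × Option String)
    (h : MaxLE dk l st.1) : MaxLE dk (l ++ [k]) (pvStep dk st k).1 := by
  obtain ⟨o1, o2⟩ := st
  cases o1 with
  | none =>
    simp only [pvStep]
    split_ifs with hk
    · refine ⟨List.mem_append_right _ (List.mem_singleton.2 rfl), hk, ?_⟩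
      intro y hy hyle
      rcases List.mem_append.1 hy with hy | hy
      · exact absurd hyle (h y hy)
      · have := List.mem_singleton.1 hy
        subst this
        exact le_rfl
    · intro y hy
      rcases List.mem_append.1 hy with hy | hy
      · exact h y hy
      · have := List.mem_singleton.1 hy
        subst this
        exact hk
  | some b =>
    simp only [pvStep]
    split_ifs with hk
    · refine ⟨List.mem_append_right _ (List.mem_singleton.2 rfl), hk.1, ?_⟩
      intro y hy hyle
      rcases List.mem_append.1 hy with hy | hy
      · exact le_trans (h.2.2 y hy hyle) (le_of_lt hk.2)
      · have := List.mem_singleton.1 hy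
        subst this
        exact le_rfl
    · refine ⟨List.mem_append_left _ h.1, h.2.1, ?_⟩
      intro y hy hyle
      rcases List.mem_append.1 hy with hy | hy
      · exact h.2.2 y hy hyle
      · have := List.mem_singleton.1 hy
        subst this
        exact le_of_not_gt (fun hbk => hk ⟨hyle, hbk⟩)

theorem minOf_step (dk k : String) (l : List String) (st : Option String × Option String)
    (h : MinOf l st.2) : MinOf (l ++ [k]) (pvStep dk st k).2 := by
  obtain ⟨o1, o2⟩ := st
  cases o2 with
  | none =>
    simp only [MinOf] at h
    subst h
    refine ⟨List.mem_singleton.2 rfl, ?_⟩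
    intro y hy
    have : y = k := by simpa using hy
    subst this
    exact le_rfl
  | some m =>
    simp only [pvStep]
    split_ifs with hlt
    · refine ⟨List.mem_append_right _ (List.mem_singleton.2 rfl), ?_⟩
      intro y hy
      rcases List.mem_append.1 hy with hy | hy
      · exact le_trans (le_of_lt hlt) (h.2 y hy)
      · have := List.mem_singleton.1 hy
        subst this
        exact le_rfl
    · refine ⟨List.mem_append_left _ h.1, ?_⟩
      intro y hy
      rcases List.mem_append.1 hy with hy | hy
      · exact h.2 y hy
      · have := List.mem_singleton.1 hy
        subst this
        exact le_of_not_gt hlt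

theorem fold_step_spec (dk : String) (l : List String) :
    MaxLE dk l (l.foldl (pvStep dk) (none, none)).1 ∧
    MinOf l (l.foldl (pvStep dk) (none, none)).2 := by
  induction l using List.reverseRecOn with
  | nil =>
    refine ⟨?_, rfl⟩
    intro y hy
    exact absurd hy (List.not_mem_nil)
  | append_singleton l k ih =>
    rw [List.foldl_append]
    simp only [List.foldl_cons, List.foldl_nil]
    exact ⟨maxLE_step dk k l _ ih.1, minOf_step dk k l _ ih.2⟩

-- a ≤-pairwise list: its last element bounds every element from above
theorem pairwise_getLast?_max (l : List String) (b : String)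
    (hp : l.Pairwise (· ≤ ·)) (hb : l.getLast? = some b) : ∀ y ∈ l, y ≤ b := by
  obtain ⟨t, ht⟩ := List.getLast?_eq_some_iff.1 hb
  subst ht
  intro y hy
  rcases List.mem_append.1 hy with hy | hy
  · exact (List.pairwise_append.1 hp).2.2 y hy b (List.mem_singleton.2 rfl)
  · rw [List.mem_singleton.1 hy]

-- Python's l[-1] is getLast?
theorem pyGet_neg_one (l : List String) : PySem.List.pyGet? l (-1) = l.getLast? := by
  cases l with
  | nil => rfl
  | cons x t =>
    simp [PySem.List.pyGet?, PySem.List.pyIdx?, List.getLast?_eq_getElem?]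

-- A's sorted→filter→last value is the greatest key ≤ dk
theorem sorted_maxLE (dk : String) (l : List String) :
    MaxLE dk l (PySem.List.pyGet? ((PySem.List.sorted l (fun k => k) false).filter
      (fun k => decide (k ≤ dk))) (-1)) := by
  rw [pyGet_neg_one]
  have hmem : ∀ y, y ∈ PySem.List.sorted l (fun k => k) false ↔ y ∈ l :=
    fun y => PySem.List.mem_sorted l (fun k => k) false y
  have hpair : (PySem.List.sorted l (fun k => k) false).Pairwise (· ≤ ·) :=
    PySem.List.sorted_pairwise l (fun k => k)
  have hfp := hpair.filter (fun k => decide (k ≤ dk))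
  cases hlast : ((PySem.List.sorted l (fun k => k) false).filter
      (fun k => decide (k ≤ dk))).getLast? with
  | none =>
    rw [List.getLast?_eq_none_iff] at hlast
    intro y hy hyle
    have : y ∈ (PySem.List.sorted l (fun k => k) false).filter (fun k => decide (k ≤ dk)) :=
      List.mem_filter.2 ⟨(hmem y).2 hy, by simpa using hyle⟩
    rw [hlast] at this
    exact absurd this (List.not_mem_nil)
  | some b =>
    have hbmem : b ∈ (PySem.List.sorted l (fun k => k) false).filter (fun k => decide (k ≤ dk)) := by
      obtain ⟨t, ht⟩ := List.getLast?_eq_some_iff.1 hlast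
      rw [ht]
      exact List.mem_append_right _ (List.mem_singleton.2 rfl)
    have hbf := List.mem_filter.1 hbmem
    refine ⟨(hmem b).1 hbf.1, by simpa using hbf.2, ?_⟩
    intro y hy hyle
    exact pairwise_getLast?_max _ b hfp hlast y
      (List.mem_filter.2 ⟨(hmem y).2 hy, by simpa using hyle⟩)

-- A's first sorted key is the least key
theorem sorted_minOf (l : List String) :
    MinOf l (PySem.List.pyGet? (PySem.List.sorted l (fun k => k) false) 0) := by
  cases hsc : PySem.List.sorted l (fun k => k) false with
  | nil =>
    have hl : l = [] := (PySem.List.sorted_eq_nil_iff l (fun k => k) false).1 hsc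
    subst hl
    exact rfl
  | cons m t =>
    have hmin : ∀ y ∈ l, m ≤ y := by
      have := PySem.List.key_head_sorted_le l (fun k => k) hsc
      simpa using this
    have hmem : m ∈ l := by
      refine (PySem.List.mem_sorted l (fun k => k) false m).1 ?_
      rw [hsc]; exact List.mem_cons_self
    have h0 : PySem.List.pyGet? (m :: t) 0 = some m := by
      simp [PySem.List.pyGet?, PySem.List.pyIdx?]
    rw [h0]
    exact ⟨hmem, hmin⟩

-- ===== VERDICT (by name: the statement is the Claim_ definition above) =====
theorem get_rate_for_date_spec : Claim_equal_get_rate_for_date := by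
  intro rates dk fallback _hdom
  unfold Spec_get_rate_for_date get_rate_for_date get_rate_for_date_alt
  simp only []
  obtain ⟨hmax, hmin⟩ := fold_step_spec dk (PySem.Dict.ofList rates).keys
  have heqmax := maxLE_unique dk (PySem.Dict.ofList rates).keys _ _
    (sorted_maxLE dk (PySem.Dict.ofList rates).keys) hmax
  have heqmin := minOf_unique (PySem.Dict.ofList rates).keys _ _
    (sorted_minOf (PySem.Dict.ofList rates).keys) hmin
  by_cases hc : (PySem.Dict.ofList rates).contains dk = true
  · -- dk is a key: B's best must be dk
    have hdkmem : dk ∈ (PySem.Dict.ofList rates).keys :=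
      (PySem.Dict.contains_iff_mem_keys (PySem.Dict.ofList rates) dk).1 hc
    cases hst : ((PySem.Dict.ofList rates).keys.foldl (pvStep dk) (none, none)).1 with
    | none =>
      rw [hst] at hmax
      exact absurd le_rfl (hmax dk hdkmem)
    | some b =>
      rw [hst] at hmax
      have hbdk : b = dk := le_antisymm hmax.2.1 (hmax.2.2 dk hdkmem le_rfl)
      simp only [hc, if_true, hbdk]
  · simp only [hc, if_false, Bool.false_eq_true]
    by_cases hne : (PySem.Dict.ofList rates).items = []
    · have hk : (PySem.Dict.ofList rates).keys = [] := by
        show (PySem.Dict.ofList rates).items.map Prod.fst = []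
        rw [hne]; rfl
      rw [hk]
      simp [hne]
    · simp only [hne, ne_eq, not_false_iff, if_true]
      rw [← heqmax, ← heqmin]
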